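/- GENERATED by farm/mkstatement.py from design/units.tsv (unit `vorbis_finish_frame.2`) and the assertions of Vorbis/Spec/FinishFrame.lean — do not edit.
   THE STATEMENT of the proof unit `vorbis_finish_frame.2`: segment 2 of `vorbis_finish_frame` (52 instructions; entries 0x107184;
   exits 0x107184,0x1071ae; ranges 0x107184-0x10718f + 0x1070bf-0x107180 + 0x107194-0x1071ac)
   takes each of its entry assertions to one of its exit assertions (`Vorbis.Spec.vorbis_finish_frame.Seg2`), given the contracts of its callees.
   What the names mean: Vorbis/Spec/Basic.lean (the shared hypotheses), Vorbis/Spec/FinishFrame.lean (the assertions). The theorem to prove: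
   `theorem vorbis_finish_frame_2_ok : Vorbis.Spec.vorbis_finish_frame_2.Statement`. -/
import Vorbis.Spec.FinishFrame
namespace Vorbis.Spec.vorbis_finish_frame_2
open X86 X86.User Asan

/-- The statement of unit `vorbis_finish_frame.2`. -/
def Statement : Prop :=
  ∀ (Lay : Layout) (_hLay : Lay.hi = 0x1000000) (μ : Microarch) (_hμ : UserX.MicroOK μ) (u₀ : State)
    (_hcode : HasCodeNat Lay u₀ Vorbis.L.vorbis_finish_frame.entry Vorbis.Code.code_vorbis_finish_frame.nat Vorbis.L.vorbis_finish_frame.size)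
    (_h_asan_load4_noabort : Asan.SmallCheck Lay μ Vorbis.WayInv (Vorbis.CodeOK u₀) [.rax, .rcx, .rdx] 4 Vorbis.L.__asan_load4_noabort.entry)
    (_h_asan_load8_noabort : Asan.SmallCheck Lay μ Vorbis.WayInv (Vorbis.CodeOK u₀) [.rax, .rcx, .rdx] 8 Vorbis.L.__asan_load8_noabort.entry),
    Vorbis.Spec.vorbis_finish_frame.Seg2 Lay μ u₀

end Vorbis.Spec.vorbis_finish_frame_2
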